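-- pv_equiv track=rewrite | github.com/ClementCadieux/AdventOfCode | 2024/Day4/main1.py | buildPosDiag
-- ===== SOURCE A (Python) =====
-- def buildPosDiag(lines):
--     diagGrid = []
--
--     startIdx = 0
--
--     for line in lines:
--         for i in range(len(line)):
--             if startIdx + i == len(diagGrid):
--                 diagGrid.append(line[i])
--             else:
--                 diagGrid[startIdx + i] += line[i]
--
--         startIdx += 1
--
--     return diagGrid
-- ===== SOURCE B (Python) =====
-- def buildPosDiag(lines):
--     n = len(lines)
--     maxlen = max((len(line) for line in lines), default=0)
--     maxcol = max((r + len(line) for r, line in enumerate(lines) if line), default=0)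
--     out = []
--     for k in range(maxcol):
--         lo = max(0, k - maxlen + 1)
--         hi = min(k + 1, n)
--         out.append("".join(lines[r][k - r] for r in range(lo, hi) if k - r < len(lines[r])))
--     return out
-- ===== Notes on version B (the rewrite author's own statement) =====
-- stated objective: simpler
-- what changed: B computes each diagonal index-first (outer loop over diagonal indices k, inner scan over the window of rows that can reach diagonal k, picking lines[r][k-r]) instead of A's position-by-position accumulation into a growing list with a create-or-append branch.
import Mathlib
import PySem

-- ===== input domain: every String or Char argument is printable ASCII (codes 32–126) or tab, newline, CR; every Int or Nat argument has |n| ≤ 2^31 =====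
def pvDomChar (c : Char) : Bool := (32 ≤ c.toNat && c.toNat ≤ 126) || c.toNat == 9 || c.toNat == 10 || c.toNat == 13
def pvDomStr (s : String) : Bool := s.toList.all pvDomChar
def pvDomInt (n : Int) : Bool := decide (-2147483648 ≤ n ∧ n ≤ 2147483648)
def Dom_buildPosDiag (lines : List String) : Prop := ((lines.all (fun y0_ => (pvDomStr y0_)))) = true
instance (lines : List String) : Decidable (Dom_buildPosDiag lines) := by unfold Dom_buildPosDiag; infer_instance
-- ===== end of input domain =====

-- B rewrites A's position-by-position accumulation as an index-first construction (outer loop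
-- over diagonals, inner scan over rows); objective: simpler, not faster.
-- Strings are handled as their character lists (String.toList / String.mk); this is exact for
-- the indexing and concatenation both Pythons perform.

-- ===== PORT A =====
-- inner loop 'for i in range(len(line))': idx = startIdx + i; out-of-range '+=' (a Python
-- IndexError) is a no-op here (List.modify), and exactly those inputs are excluded by Pre_.
def pvInnerA : List (List Char) → Nat → List Char → List (List Char)
  | diag, _, [] => diag
  | diag, idx, c :: rest =>
      pvInnerA (if idx = diag.length then diag ++ [[c]] else diag.modify idx (fun s => s ++ [c])) (idx + 1) rest

def buildPosDiag (lines : List String) : List String :=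
  ((lines.foldl (fun (st : List (List Char) × Nat) line =>
      (pvInnerA st.1 st.2 line.toList, st.2 + 1)) ([], 0)).1).map String.mk

-- ===== PORT B =====
-- maxcol = max((r + len(line) for r, line in enumerate(lines) if line), default=0)
def pvMaxcol : List (List Char) → Nat → Nat
  | [], _ => 0
  | cs :: rest, r => if cs = [] then pvMaxcol rest (r + 1) else max (r + cs.length) (pvMaxcol rest (r + 1))

-- maxlen = max((len(line) for line in lines), default=0)
def pvMaxlen : List (List Char) → Nat
  | [] => 0
  | cs :: rest => max cs.length (pvMaxlen rest)

-- per diagonal k: lo = max(0, k - maxlen + 1) (Nat: k + 1 - maxlen), hi = min(k + 1, n), and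
-- "".join(lines[r][k - r] for r in range(lo, hi) if k - r < len(lines[r]))
def buildPosDiag_alt (lines : List String) : List String :=
  let rows := lines.map String.toList
  let n := rows.length
  let maxlen := pvMaxlen rows
  (List.range (pvMaxcol rows 0)).map (fun k =>
    let lo := k + 1 - maxlen
    let hi := min (k + 1) n
    String.mk ((List.range' lo (hi - lo)).flatMap (fun r =>
      if k - r < (rows.getD r []).length then [(rows.getD r []).getD (k - r) ' '] else [])))

-- ===== PRECONDITION & SPEC =====
-- Pre_ excludes exactly the inputs on which A raises IndexError: a nonempty row r > 0 whose
-- first diagonal index r lies beyond every diagonal reached by the rows above it.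
def Pre_buildPosDiag (lines : List String) : Prop :=
  ∀ r, r < lines.length → (lines.getD r "").toList ≠ [] →
    r = 0 ∨ ∃ r', r' < r ∧ r ≤ r' + (lines.getD r' "").toList.length
instance (lines : List String) : Decidable (Pre_buildPosDiag lines) := by
  unfold Pre_buildPosDiag; infer_instance

def pvWitness_buildPosDiag : List String := ["ab", "cd", "e"]

def Spec_buildPosDiag (lines : List String) (out : List String) : Prop := out = buildPosDiag_alt lines
instance (lines : List String) (out : List String) : Decidable (Spec_buildPosDiag lines out) := by unfold Spec_buildPosDiag; infer_instance

-- ===== CLAIM (what is proved, stated in full; the proofs are below) =====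
def Claim_equal_buildPosDiag : Prop := ∀ (lines : List String), Dom_buildPosDiag lines → Pre_buildPosDiag lines → Spec_buildPosDiag lines (buildPosDiag lines)

-- ===== LEMMAS AND PROOFS =====

-- proof-side row-by-row rendering of the diagonals (the shape in which A's loop produces them)
def pvDiagChars : List (List Char) → Nat → Nat → List Char
  | [], _, _ => []
  | cs :: rest, r, k =>
      (if r ≤ k ∧ k - r < cs.length then [cs.getD (k - r) ' '] else []) ++ pvDiagChars rest (r + 1) k

-- proof-side rendering of Pre_ as a running condition along A's loop
def PreFrom : List (List Char) → Nat → Nat → Prop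
  | [], _, _ => True
  | cs :: rest, s, L =>
      if cs = [] then PreFrom rest (s + 1) L
      else s ≤ L ∧ PreFrom rest (s + 1) (max L (s + cs.length))

lemma pvInnerA_spec (cs : List Char) : ∀ (diag : List (List Char)) (start : Nat),
    start ≤ diag.length →
    (pvInnerA diag start cs).length = max diag.length (start + cs.length) ∧
    ∀ j, (pvInnerA diag start cs).getD j [] =
      diag.getD j [] ++ (if start ≤ j ∧ j - start < cs.length then [cs.getD (j - start) ' '] else []) := by
  induction cs with
  | nil =>
    intro diag start h
    refine ⟨by simp [pvInnerA]; omega, fun j => ?_⟩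
    simp [pvInnerA]
  | cons c rest ih =>
    intro diag start h
    set diag' := if start = diag.length then diag ++ [[c]] else diag.modify start (fun s => s ++ [c]) with hd'
    have hlen' : diag'.length = max diag.length (start + 1) := by
      rw [hd']; split <;> simp_all <;> omega
    have hle' : start + 1 ≤ diag'.length := by omega
    have hget' : ∀ j, diag'.getD j [] = diag.getD j [] ++ (if j = start then [c] else []) := by
      intro j
      rw [hd']
      by_cases hj : j = start
      · subst hj
        split
        · rename_i he
          simp [List.getD, he, List.getElem?_append_right]
        · rename_i he
          have hlt : j < diag.length := by omega
          simp [List.getD, List.getElem?_modify, List.getElem?_eq_getElem hlt]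
      · split
        · rename_i he
          by_cases hlt : j < diag.length
          · simp [List.getD, List.getElem?_append_left hlt, hj]
          · have h1 : diag[j]? = none := by simp; omega
            have h2 : (diag ++ [[c]])[j]? = none := by simp; omega
            simp [List.getD, h1, h2, hj]
        · simp [List.getD, List.getElem?_modify, Ne.symm hj, hj]
    obtain ⟨ihl, ihg⟩ := ih diag' (start + 1) hle'
    constructor
    · show (pvInnerA diag' (start + 1) rest).length = _
      rw [ihl, hlen']; simp [Nat.succ_add]; omega
    · intro j
      show (pvInnerA diag' (start + 1) rest).getD j [] = _
      rw [ihg j, hget' j, List.append_assoc]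
      congr 1
      rcases Nat.lt_trichotomy j start with hlt | heq | hgt
      · have h1 : ¬ j = start := by omega
        have h2 : ¬ (start + 1 ≤ j ∧ j - (start + 1) < rest.length) := by omega
        have h3 : ¬ (start ≤ j ∧ j - start < (c :: rest).length) := by
          simp only [List.length_cons]; omega
        simp only [if_neg h1, if_neg h2, if_neg h3, List.nil_append]
      · have h2 : ¬ (start + 1 ≤ j ∧ j - (start + 1) < rest.length) := by omega
        have h3 : start ≤ j ∧ j - start < (c :: rest).length := by
          simp only [List.length_cons]; omega
        have h0 : j - start = 0 := by omega
        rw [if_pos heq, if_neg h2, if_pos h3, List.append_nil, h0, List.getD_cons_zero]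
      · have h1 : ¬ j = start := by omega
        have heqsub : j - start = (j - (start + 1)) + 1 := by omega
        have h23 : (start + 1 ≤ j ∧ j - (start + 1) < rest.length) ↔
            (start ≤ j ∧ j - start < (c :: rest).length) := by
          simp only [List.length_cons]; omega
        by_cases hc : start + 1 ≤ j ∧ j - (start + 1) < rest.length
        · rw [if_neg h1, List.nil_append, if_pos hc, if_pos (h23.mp hc), heqsub,
            List.getD_cons_succ]
        · rw [if_neg h1, List.nil_append, if_neg hc, if_neg (fun h => hc (h23.mpr h))]

lemma loopA_spec (rows : List (List Char)) : ∀ (s : Nat) (diag : List (List Char)),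
    PreFrom rows s diag.length →
    (let out := (rows.foldl (fun (st : List (List Char) × Nat) cs => (pvInnerA st.1 st.2 cs, st.2 + 1)) (diag, s)).1
     out.length = max diag.length (pvMaxcol rows s) ∧
     ∀ j, out.getD j [] = diag.getD j [] ++ pvDiagChars rows s j) := by
  induction rows with
  | nil => intro s diag _; exact ⟨by simp [pvMaxcol], by simp [pvDiagChars]⟩
  | cons cs rest ih =>
    intro s diag hpre
    by_cases hcs : cs = []
    · subst hcs
      have hpre' : PreFrom rest (s + 1) diag.length := by
        simpa [PreFrom] using hpre
      obtain ⟨ihl, ihg⟩ := ih (s + 1) diag hpre'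
      refine ⟨?_, ?_⟩
      · simpa [List.foldl, pvInnerA, pvMaxcol] using ihl
      · intro j
        have := ihg j
        simpa [List.foldl, pvInnerA, pvDiagChars] using this
    · have hpre2 : s ≤ diag.length ∧ PreFrom rest (s + 1) (max diag.length (s + cs.length)) := by
        simpa [PreFrom, hcs] using hpre
      obtain ⟨hinl, hing⟩ := pvInnerA_spec cs diag s hpre2.1
      have hpre' : PreFrom rest (s + 1) (pvInnerA diag s cs).length := by
        rw [hinl]; exact hpre2.2
      obtain ⟨ihl, ihg⟩ := ih (s + 1) (pvInnerA diag s cs) hpre'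
      refine ⟨?_, ?_⟩
      · show (List.foldl _ (pvInnerA diag s cs, s + 1) rest).1.length = _
        rw [ihl, hinl, pvMaxcol]
        rw [if_neg hcs]; omega
      · intro j
        show (List.foldl _ (pvInnerA diag s cs, s + 1) rest).1.getD j [] = _
        rw [ihg j, hing j, pvDiagChars, List.append_assoc]

lemma pre_to_preFrom (rest : List (List Char)) : ∀ (s L : Nat),
    (∀ r, r < rest.length → rest.getD r [] ≠ [] →
      s + r ≤ L ∨ ∃ r', r' < r ∧ r ≤ r' + (rest.getD r' []).length) →
    PreFrom rest s L := by
  induction rest with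
  | nil => intro s L _; trivial
  | cons cs rest' ih
  =>
    intro s L h
    by_cases hcs : cs = []
    · simp only [PreFrom, hcs, if_pos rfl]
      apply ih
      intro r hr hne
      have := h (r + 1) (by simpa using Nat.succ_lt_succ hr) (by simpa using hne)
      rcases this with h1 | ⟨r', hr', hle⟩
      · left; omega
      · rcases r' with _ | r''
        · exfalso; simp [hcs] at hle
        · have hle2 : r + 1 ≤ r'' + 1 + (rest'.getD r'' []).length := by
            rwa [List.getD_cons_succ] at hle
          right; exact ⟨r'', by omega, by omega⟩
    · simp only [PreFrom, hcs, if_neg hcs]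
      constructor
      · have := h 0 (by simp) (by simpa using hcs)
        rcases this with h1 | ⟨r', hr', _⟩
        · omega
        · omega
      · apply ih
        intro r hr hne
        have := h (r + 1) (by simpa using Nat.succ_lt_succ hr) (by simpa using hne)
        rcases this with h1 | ⟨r', hr', hle⟩
        · left; omega
        · rcases r' with _ | r''
          · left; simp at hle; omega
          · have hle2 : r + 1 ≤ r'' + 1 + (rest'.getD r'' []).length := by
              rwa [List.getD_cons_succ] at hle
            right; exact ⟨r'', by omega, by omega⟩

lemma pvMaxlen_bound (rows : List (List Char)) : ∀ r, (rows.getD r []).length ≤ pvMaxlen rows := by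
  induction rows with
  | nil => intro r; simp [List.getD]
  | cons cs rest ih =>
    intro r
    cases r with
    | zero => simp [pvMaxlen]
    | succ r' => rw [List.getD_cons_succ, pvMaxlen]; exact le_trans (ih r') (le_max_right _ _)

lemma pvMaxcol_bound (rows : List (List Char)) : ∀ s, pvMaxcol rows s ≤ s + rows.length + pvMaxlen rows := by
  induction rows with
  | nil => intro s; simp [pvMaxcol]
  | cons cs rest ih =>
    intro s
    rw [pvMaxcol, pvMaxlen]
    have := ih (s + 1)
    split <;> simp only [List.length_cons] <;> omega

lemma pvDiagChars_flatMap (rows : List (List Char)) : ∀ s k, pvDiagChars rows s k =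
    (List.range rows.length).flatMap (fun i =>
      if s + i ≤ k ∧ k - (s + i) < (rows.getD i []).length then
        [(rows.getD i []).getD (k - (s + i)) ' '] else []) := by
  induction rows with
  | nil => intro s k; simp [pvDiagChars]
  | cons cs rest ih =>
    intro s k
    rw [pvDiagChars, List.length_cons, List.range_succ_eq_map, List.flatMap_cons,
      List.flatMap_map]
    congr 1
    rw [ih (s + 1) k]
    apply List.flatMap_congr
    intro i _
    have e : s + (i + 1) = s + 1 + i := by omega
    simp only [Nat.succ_eq_add_one, List.getElem?_cons_succ, List.getD, e]

lemma pvDiagChars_window (rows : List (List Char)) (k : Nat) (hk : k < pvMaxcol rows 0) :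
    pvDiagChars rows 0 k =
      (List.range' (k + 1 - pvMaxlen rows) (min (k + 1) rows.length - (k + 1 - pvMaxlen rows))).flatMap
        (fun r => if k - r < (rows.getD r []).length then [(rows.getD r []).getD (k - r) ' '] else []) := by
  set n := rows.length with hn
  set maxlen := pvMaxlen rows with hml
  set lo := k + 1 - maxlen with hlo
  set hi := min (k + 1) n with hhi
  have hbound : pvMaxcol rows 0 ≤ n + maxlen := by
    have := pvMaxcol_bound rows 0
    omega
  have hlohi : lo ≤ hi := by omega
  have hhin : hi ≤ n := by omega
  set F : Nat → List Char := fun i =>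
    if i ≤ k ∧ k - i < (rows.getD i []).length then [(rows.getD i []).getD (k - i) ' '] else []
    with hF
  have h1 : List.range' 0 lo ++ List.range' lo (hi - lo) = List.range' 0 hi := by
    have := List.range'_append (s := 0) (m := lo) (n := hi - lo) (step := 1)
    simpa [show lo + (hi - lo) = hi from by omega] using this
  have h2 : List.range' 0 hi ++ List.range' hi (n - hi) = List.range' 0 n := by
    have := List.range'_append (s := 0) (m := hi) (n := n - hi) (step := 1)
    simpa [show hi + (n - hi) = n from by omega] using this
  have hsplit : List.range n = List.range' 0 lo ++ List.range' lo (hi - lo) ++ List.range' hi (n - hi) := by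
    rw [List.range_eq_range', ← h2, ← h1]
  have hleft : (List.range' 0 lo).flatMap F = [] := by
    rw [List.flatMap_eq_nil_iff]
    intro i hi'
    rw [List.mem_range'_1] at hi'
    have hlen := pvMaxlen_bound rows i
    show (if i ≤ k ∧ k - i < (rows.getD i []).length then [(rows.getD i []).getD (k - i) ' '] else []) = []
    have : ¬ (i ≤ k ∧ k - i < (rows.getD i []).length) := by omega
    rw [if_neg this]
  have hright : (List.range' hi (n - hi)).flatMap F = [] := by
    rw [List.flatMap_eq_nil_iff]
    intro i hi'
    rw [List.mem_range'_1] at hi'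
    have hlen := pvMaxlen_bound rows i
    have hgd : n ≤ i → rows.getD i [] = [] := by
      intro h
      rw [List.getD_eq_getElem?_getD, List.getElem?_eq_none (by omega), Option.getD_none]
    show (if i ≤ k ∧ k - i < (rows.getD i []).length then [(rows.getD i []).getD (k - i) ' '] else []) = []
    by_cases hcase : k + 1 ≤ n
    · have : ¬ (i ≤ k ∧ k - i < (rows.getD i []).length) := by omega
      rw [if_neg this]
    · have h0 : (rows.getD i []).length = 0 := by rw [hgd (by omega)]; rfl
      have : ¬ (i ≤ k ∧ k - i < (rows.getD i []).length) := by omega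
      rw [if_neg this]
  have hmid : ∀ r ∈ List.range' lo (hi - lo), F r =
      (if k - r < (rows.getD r []).length then [(rows.getD r []).getD (k - r) ' '] else []) := by
    intro r hr
    rw [List.mem_range'_1] at hr
    have hrk : r ≤ k := by omega
    show (if r ≤ k ∧ k - r < (rows.getD r []).length then [(rows.getD r []).getD (k - r) ' '] else []) = _
    simp [hrk]
  rw [pvDiagChars_flatMap rows 0 k]
  have hF' : (fun i => if 0 + i ≤ k ∧ k - (0 + i) < (rows.getD i []).length then
      [(rows.getD i []).getD (k - (0 + i)) ' '] else []) = F := by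
    funext i; rw [hF]; simp
  rw [hF', ← hn, hsplit, List.flatMap_append, List.flatMap_append, hleft, hright,
    List.nil_append, List.append_nil]
  exact List.flatMap_congr hmid

lemma getD_map_toList (lines : List String) (r : Nat) :
    (lines.map String.toList).getD r [] = (lines.getD r "").toList := by
  simp only [List.getD, List.getElem?_map]
  cases h : lines[r]? <;> simp [h]

-- ===== VERDICT (by name: the statement is the Claim_ definition above) =====
theorem buildPosDiag_spec : Claim_equal_buildPosDiag := by
  intro lines _ hpre
  show buildPosDiag lines = buildPosDiag_alt lines
  unfold buildPosDiag buildPosDiag_alt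
  set rows := lines.map String.toList with hrows
  have hfold : (lines.foldl (fun (st : List (List Char) × Nat) line =>
        (pvInnerA st.1 st.2 line.toList, st.2 + 1)) ([], 0)) =
      (rows.foldl (fun (st : List (List Char) × Nat) cs =>
        (pvInnerA st.1 st.2 cs, st.2 + 1)) ([], 0)) := by
    rw [hrows, List.foldl_map]
  have hpf : PreFrom rows 0 (([] : List (List Char)).length) := by
    apply pre_to_preFrom
    intro r hr hne
    have hr' : r < lines.length := by simpa [hrows] using hr
    have hne' : (lines.getD r "").toList ≠ [] := by rwa [hrows, getD_map_toList] at hne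
    rcases hpre r hr' hne' with h0 | ⟨r', hr'2, hle⟩
    · left; omega
    · right; exact ⟨r', hr'2, by rwa [hrows, getD_map_toList]⟩
  obtain ⟨hl, hg⟩ := loopA_spec rows 0 [] hpf
  set out := (rows.foldl (fun (st : List (List Char) × Nat) cs => (pvInnerA st.1 st.2 cs, st.2 + 1)) ([], 0)).1 with hout
  have hlen : out.length = pvMaxcol rows 0 := by simpa using hl
  have hcore : out = (List.range (pvMaxcol rows 0)).map (fun k => pvDiagChars rows 0 k) := by
    apply List.ext_getElem
    · simp [hlen]
    · intro i h1 h2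
      have hi : i < pvMaxcol rows 0 := by simpa using h2
      have := hg i
      simp only [List.getD, List.getElem?_eq_getElem h1, Option.getD_some, List.getD_nil,
        List.nil_append] at this
      simp [this]
  rw [hfold, ← hout, hcore, List.map_map]
  apply List.map_congr_left
  intro k hk
  rw [List.mem_range] at hk
  simp only [Function.comp]
  rw [pvDiagChars_window rows k hk]
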